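-- pv_equiv track=rewrite | github.com/nanthony80/repliSTREAM | scripts/09_CRABS_to_APSCALE.py | extract_ranks
-- ===== SOURCE A (Python) =====
-- def extract_ranks(lin, ranks, names):
--     wanted = ["superkingdom", "phylum", "class", "order", "family", "genus", "species"]
--     out = {k: "" for k in wanted}
--     if not lin:
--         return out
--     for r in wanted:
--         ts = [t for t in lin if ranks.get(t, "").lower() == r]
--         if ts:
--             out[r] = names[ts[0]]
--     return out
-- ===== SOURCE B (Python) =====
-- def extract_ranks(lin, ranks, names):
--     wanted = ["superkingdom", "phylum", "class", "order", "family", "genus", "species"]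
--     out = {k: "" for k in wanted}
--     if not lin:
--         return out
--     first = {}
--     for t in lin:
--         rk = ranks.get(t, "").lower()
--         if rk in out and rk not in first:
--             first[rk] = t
--     for r in wanted:
--         if r in first:
--             out[r] = names[first[r]]
--     return out
-- ===== Notes on version B (the rewrite author's own statement) =====
-- stated objective: faster
-- what changed: Replaces seven full scans of lin (one filter pass per wanted rank) with a single pass that records the first taxid seen for each wanted rank in a dict, then a final loop over wanted doing the names lookups in the same order.
import Mathlib
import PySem

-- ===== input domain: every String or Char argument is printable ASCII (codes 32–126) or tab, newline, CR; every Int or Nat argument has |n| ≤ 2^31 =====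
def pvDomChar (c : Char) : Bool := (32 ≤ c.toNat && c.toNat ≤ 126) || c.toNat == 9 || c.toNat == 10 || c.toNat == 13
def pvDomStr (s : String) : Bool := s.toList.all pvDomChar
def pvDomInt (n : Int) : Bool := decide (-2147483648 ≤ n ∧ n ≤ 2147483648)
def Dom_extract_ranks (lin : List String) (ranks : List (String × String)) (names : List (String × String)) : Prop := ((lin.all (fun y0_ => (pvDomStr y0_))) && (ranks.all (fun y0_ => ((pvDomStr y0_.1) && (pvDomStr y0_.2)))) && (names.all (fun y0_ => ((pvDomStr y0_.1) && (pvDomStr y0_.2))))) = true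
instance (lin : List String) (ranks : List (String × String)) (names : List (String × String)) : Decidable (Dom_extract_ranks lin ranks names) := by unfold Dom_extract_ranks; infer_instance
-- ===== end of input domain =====

-- B replaces A's seven filter passes over lin (one per wanted rank) with a single scan
-- building a first-taxid-per-rank dict, then one lookup loop over the wanted ranks.

-- shared helpers (the Python ranks/names dicts are association lists; lookup = first match)
def pvWanted : List String :=
  ["superkingdom", "phylum", "class", "order", "family", "genus", "species"]

-- ranks.get(t, "").lower()
def pvRankOf (ranks : List (String × String)) (t : String) : String :=
  PySem.Str.lower ((ranks.lookup t).getD "")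

-- out[r] = v where out is a dict that already contains key r (overwrite keeps position)
def pvSetK (out : List (String × String)) (k : String) (v : String) : List (String × String) :=
  out.map (fun p => if p.1 == k then (k, v) else p)

-- ===== PORT A =====
def extract_ranks (lin : List String) (ranks : List (String × String)) (names : List (String × String)) : List (String × String) :=
  let out := pvWanted.map (fun k => (k, ""))
  if lin = [] then out
  else
    pvWanted.foldl (fun out r =>
      match lin.filter (fun t => pvRankOf ranks t == r) with
      | [] => out
      | t :: _ => pvSetK out r ((names.lookup t).getD "")) out

-- ===== PORT B =====
def extract_ranks_alt (lin : List String) (ranks : List (String × String)) (names : List (String × String)) : List (String × String) :=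
  let out := pvWanted.map (fun k => (k, ""))
  if lin = [] then out
  else
    let first := lin.foldl (fun f t =>
      let rk := pvRankOf ranks t
      if pvWanted.contains rk && (f.lookup rk).isNone then f ++ [(rk, t)] else f)
      ([] : List (String × String))
    pvWanted.foldl (fun out r =>
      match first.lookup r with
      | some t => pvSetK out r ((names.lookup t).getD "")
      | none => out) out

-- ===== PRECONDITION & SPEC =====
-- Pre_ excludes exactly the inputs on which the Python A raises KeyError: those where,
-- for some wanted rank, the first taxid of lin carrying that rank is missing from names.
def Pre_extract_ranks (lin : List String) (ranks : List (String × String)) (names : List (String × String)) : Prop :=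
  ∀ r ∈ pvWanted,
    ((lin.find? (fun t => pvRankOf ranks t == r)).all (fun t => (names.lookup t).isSome)) = true
instance (lin : List String) (ranks : List (String × String)) (names : List (String × String)) : Decidable (Pre_extract_ranks lin ranks names) := by unfold Pre_extract_ranks; infer_instance

def pvWitness_extract_ranks : List String × (List (String × String)) × (List (String × String)) :=
  (["7", "9"], [("7", "Genus"), ("9", "species")], [("7", "Homo"), ("9", "Homo sapiens")])

def Spec_extract_ranks (lin : List String) (ranks : List (String × String)) (names : List (String × String)) (out : List (String × String)) : Prop := out = extract_ranks_alt lin ranks names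
instance (lin : List String) (ranks : List (String × String)) (names : List (String × String)) (out : List (String × String)) : Decidable (Spec_extract_ranks lin ranks names out) := by unfold Spec_extract_ranks; infer_instance

-- ===== CLAIM (what is proved, stated in full; the proofs are below) =====
def Claim_equal_extract_ranks : Prop := ∀ (lin : List String) (ranks : List (String × String)) (names : List (String × String)), Dom_extract_ranks lin ranks names → Pre_extract_ranks lin ranks names → Spec_extract_ranks lin ranks names (extract_ranks lin ranks names)

-- ===== LEMMAS AND PROOFS =====

-- B's single scan finds, per wanted rank r, exactly the first element of lin with rank r.
theorem pv_lookup_scan (ranks : List (String × String)) (r : String)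
    (hr : pvWanted.contains r = true) :
    ∀ (lin : List String) (f : List (String × String)),
      (lin.foldl (fun f t =>
        let rk := pvRankOf ranks t
        if pvWanted.contains rk && (f.lookup rk).isNone then f ++ [(rk, t)] else f) f).lookup r
      = (f.lookup r).or (lin.find? (fun t => pvRankOf ranks t == r)) := by
  intro lin
  induction lin with
  | nil => intro f; simp
  | cons t lin ih =>
    intro f
    simp only [List.foldl_cons, List.find?_cons]
    by_cases hpred : pvRankOf ranks t = r
    · subst hpred
      simp only [hr, Bool.true_and, beq_self_eq_true]
      cases hf : f.lookup (pvRankOf ranks t) with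
      | some v =>
        simp only [hf, Option.isNone_some, if_neg Bool.false_ne_true, ih, Option.or]
      | none =>
        simp only [Option.isNone_none, ih]
        have : (f ++ [(pvRankOf ranks t, t)]).lookup (pvRankOf ranks t) = some t := by
          rw [List.lookup_append, hf]; simp [List.lookup]
        simp [this, Option.or]
    · have hne : (pvRankOf ranks t == r) = false := by
        simp [hpred]
      simp only [hne]
      by_cases hins : (pvWanted.contains (pvRankOf ranks t) && (f.lookup (pvRankOf ranks t)).isNone) = true
      · have hlk : (r == pvRankOf ranks t) = false := by
          simp [Ne.symm hpred]
        have heq : (f ++ [(pvRankOf ranks t, t)]).lookup r = f.lookup r := by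
          rw [List.lookup_append]
          cases hfr : f.lookup r with
          | some v => simp
          | none => simp [List.lookup, hlk]
        rw [if_pos hins, ih, heq]
      · simp only [Bool.not_eq_true] at hins
        simp only [hins, if_neg Bool.false_ne_true, ih]

-- A's filter-then-head equals find?.
theorem pv_filter_match {β : Type} (p : String → Bool) (a : β) (g : String → β) :
    ∀ l : List String,
      (match l.filter p with | [] => a | t :: _ => g t)
      = (match l.find? p with | none => a | some t => g t) := by
  intro l
  induction l with
  | nil => rfl
  | cons x l ih =>
    simp only [List.filter_cons, List.find?_cons]
    by_cases hx : p x = true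
    · simp [hx]
    · simp only [Bool.not_eq_true] at hx
      simp [hx, ih]

-- ===== VERDICT (by name: the statement is the Claim_ definition above) =====
theorem extract_ranks_spec : Claim_equal_extract_ranks := by
  intro lin ranks names _ _
  unfold Spec_extract_ranks extract_ranks extract_ranks_alt
  by_cases hlin : lin = []
  · simp [hlin]
  · simp only [if_neg hlin]
    apply PySem.List.foldl_congr_mem'
    intro r hr out
    have hc : pvWanted.contains r = true := by
      simpa [List.contains_iff_mem] using hr
    rw [pv_filter_match (fun t => pvRankOf ranks t == r) out
        (fun t => pvSetK out r ((names.lookup t).getD ""))]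
    rw [pv_lookup_scan ranks r hc lin []]
    simp only [List.lookup_nil, Option.or]
    cases lin.find? (fun t => pvRankOf ranks t == r) <;> rfl
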